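-- pv_equiv track=rewrite | github.com/futuroptimist/gitshelves | gitshelves/scad.py | generate_scad_monthly
-- ===== SOURCE A (Python) =====
-- from typing import Iterable, Dict, Tuple
--
-- def blocks_for_contributions(count: int) -> int:
--     """Return the number of stacked blocks for a contribution count.
--
--     Uses a logarithmic scale where 1 block represents 1-9 contributions,
--     2 blocks represent 10-99 contributions, and so on. Zero or negative
--     counts yield zero blocks.
--     """
--     if count <= 0:
--         return 0
--     import math
--
--     return int(math.log10(count)) + 1
--
-- def generate_scad_monthly(
--     contributions: Dict[Tuple[int, int], int], months_per_row: int = 12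
-- ) -> str:
--     """Generate an OpenSCAD script from monthly contribution counts.
--
--     The ``contributions`` mapping uses ``(year, month)`` tuples as keys. The
--     months are arranged left-to-right in rows of ``months_per_row`` slots.  Each
--     slot contains a stack of blocks on a logarithmic scale, so a month with
--     1‑9 contributions shows one block, 10‑99 contributions shows two blocks, and
--     so on.
--     """
--     scad_lines = ["// Generated by gitshelves"]
--     block_size = 10  # mm per block cube
--     spacing = 12
--     if not contributions:
--         return "\n".join(scad_lines)
--
--     first_year = min(year for year, _ in contributions)
--     last_year = max(year for year, _ in contributions)
--     idx = 0
--     for year in range(first_year, last_year + 1):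
--         for month in range(1, 13):
--             count = contributions.get((year, month), 0)
--             blocks = blocks_for_contributions(count)
--             col = idx % months_per_row
--             row = idx // months_per_row
--             for level in range(blocks):
--                 x = col * spacing
--                 y = row * spacing
--                 z = level * block_size
--                 scad_lines.append(
--                     f"translate([{x}, {y}, {z}]) cube({block_size}); // {year}-{month:02}"
--                 )
--             idx += 1
--     return "\n".join(scad_lines)
-- ===== SOURCE B (Python) =====
-- from typing import Dict, Tuple
--
--
-- def blocks_for_contributions(count: int) -> int:
--     if count <= 0:
--         return 0
--     import math
--
--     return int(math.log10(count)) + 1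
--
--
-- def generate_scad_monthly(
--     contributions: Dict[Tuple[int, int], int], months_per_row: int = 12
-- ) -> str:
--     """Sparse re-implementation: emit cubes only for the months that actually
--     have contributions, sorted by grid index, instead of scanning every
--     (year, month) cell of the dense year range."""
--     lines = ["// Generated by gitshelves"]
--     if not contributions:
--         return "\n".join(lines)
--     first_year = min(year for year, _ in contributions)
--     entries = [(ym, c) for ym, c in contributions.items() if c > 0 and 1 <= ym[1] <= 12]
--     entries.sort(key=lambda e: (e[0][0] - first_year) * 12 + (e[0][1] - 1))
--     for (year, month), count in entries:
--         idx = (year - first_year) * 12 + (month - 1)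
--         col = idx % months_per_row
--         row = idx // months_per_row
--         for level in range(blocks_for_contributions(count)):
--             lines.append(
--                 f"translate([{col * 12}, {row * 12}, {level * 10}]) cube(10); // {year}-{month:02}"
--             )
--     return "\n".join(lines)
-- ===== Notes on version B (the rewrite author's own statement) =====
-- stated objective: faster
-- what changed: B replaces A's dense scan of every (year, month) cell of the whole first..last year range (with a running idx counter) by a sparse pass: it filters the dict items to positive counts with month in 1..12, sorts them by grid index (year-first_year)*12+(month-1), and emits the cube lines directly from each entry.
import Mathlib
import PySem

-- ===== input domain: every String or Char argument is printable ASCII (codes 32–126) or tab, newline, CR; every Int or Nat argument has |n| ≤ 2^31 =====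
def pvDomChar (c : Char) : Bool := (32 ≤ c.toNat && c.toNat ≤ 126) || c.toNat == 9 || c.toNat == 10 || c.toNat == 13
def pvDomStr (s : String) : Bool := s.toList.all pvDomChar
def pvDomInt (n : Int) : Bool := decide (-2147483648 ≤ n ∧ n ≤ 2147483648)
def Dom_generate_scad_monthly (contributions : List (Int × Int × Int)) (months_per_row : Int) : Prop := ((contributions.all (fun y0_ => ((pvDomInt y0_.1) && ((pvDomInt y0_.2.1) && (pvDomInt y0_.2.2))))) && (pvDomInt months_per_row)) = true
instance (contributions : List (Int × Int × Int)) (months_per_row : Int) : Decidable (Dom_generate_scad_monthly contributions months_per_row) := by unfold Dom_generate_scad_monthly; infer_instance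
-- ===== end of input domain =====

-- ===== PORT A =====
-- int(math.log10(count)) + 1 ported as the decimal digit count of count,
-- exact for 1 <= count <= 2^31 (checked against CPython at decade boundaries).
def pyDigits (n : Nat) : Nat :=
  if _h : n < 10 then 1 else pyDigits (n / 10) + 1
decreasing_by exact Nat.div_lt_self (by omega) (by omega)

def blocks_for_contributions (count : Int) : Int :=
  if count ≤ 0 then 0 else (pyDigits count.toNat : Int)

-- the f-string "translate([{x}, {y}, {z}]) cube({block_size}); // {year}-{month:02}"
-- (block_size is always 10; month is always 1..12 at the call sites, so :02 pads one '0')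
def cubeLine (x y z year month : Int) : String :=
  "translate([" ++ PySem.Int.toStr x ++ ", " ++ PySem.Int.toStr y ++ ", " ++ PySem.Int.toStr z
    ++ "]) cube(10); // " ++ PySem.Int.toStr year ++ "-"
    ++ (if month < 10 then "0" ++ PySem.Int.toStr month else PySem.Int.toStr month)

-- the dict parameter arrives as its (year, month, count) items; dict semantics via Dict.ofList
def generate_scad_monthly (contributions : List (Int × Int × Int)) (months_per_row : Int) : String :=
  let scad_lines : List String := ["// Generated by gitshelves"]
  let block_size : Int := 10
  let spacing : Int := 12
  let d : PySem.Dict (Int × Int) Int :=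
    PySem.Dict.ofList (contributions.map (fun t => ((t.1, t.2.1), t.2.2)))
  if d.items = [] then PySem.Str.join "\n" scad_lines
  else
    let first_year := (PySem.List.min? (d.items.map (fun p => p.1.1)) (fun y => y)).getD 0
    let last_year := (PySem.List.max? (d.items.map (fun p => p.1.1)) (fun y => y)).getD 0
    let st :=
      (PySem.List.pyRange first_year (last_year + 1) 1).foldl (fun st year =>
        (PySem.List.pyRange 1 13 1).foldl (fun (st : Int × List String) month =>
          let count := d.getD (year, month) 0
          let blocks := blocks_for_contributions count
          let col := PySem.Int.mod st.1 months_per_row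
          let row := PySem.Int.floordiv st.1 months_per_row
          let lines := (PySem.List.pyRange 0 blocks 1).foldl (fun lines level =>
            lines ++ [cubeLine (col * spacing) (row * spacing) (level * block_size) year month]) st.2
          (st.1 + 1, lines)) st) ((0 : Int), scad_lines)
    PySem.Str.join "\n" st.2

-- ===== PORT B =====
def generate_scad_monthly_alt (contributions : List (Int × Int × Int)) (months_per_row : Int) : String :=
  let lines : List String := ["// Generated by gitshelves"]
  let d : PySem.Dict (Int × Int) Int :=
    PySem.Dict.ofList (contributions.map (fun t => ((t.1, t.2.1), t.2.2)))
  if d.items = [] then PySem.Str.join "\n" lines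
  else
    let first_year := (PySem.List.min? (d.items.map (fun p => p.1.1)) (fun y => y)).getD 0
    let entries := d.items.filter
      (fun p => decide (0 < p.2) && (decide (1 ≤ p.1.2) && decide (p.1.2 ≤ 12)))
    let entries := PySem.List.sorted entries
      (fun e => (e.1.1 - first_year) * 12 + (e.1.2 - 1)) false
    let lines := entries.foldl (fun lines e =>
      let idx := (e.1.1 - first_year) * 12 + (e.1.2 - 1)
      let col := PySem.Int.mod idx months_per_row
      let row := PySem.Int.floordiv idx months_per_row
      (PySem.List.pyRange 0 (blocks_for_contributions e.2) 1).foldl (fun lines level =>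
        lines ++ [cubeLine (col * 12) (row * 12) (level * 10) e.1.1 e.1.2]) lines) lines
    PySem.Str.join "\n" lines

-- ===== PRECONDITION & SPEC =====
-- Pre_ excludes months_per_row = 0 on a non-empty dict: there A hits idx % 0 and raises ZeroDivisionError.
def Pre_generate_scad_monthly (contributions : List (Int × Int × Int)) (months_per_row : Int) : Prop :=
  contributions = [] ∨ months_per_row ≠ 0
instance (contributions : List (Int × Int × Int)) (months_per_row : Int) : Decidable (Pre_generate_scad_monthly contributions months_per_row) := by unfold Pre_generate_scad_monthly; infer_instance
def pvWitness_generate_scad_monthly : (List (Int × Int × Int)) × Int := ([(2020, 1, 5), (2020, 2, 37)], 12)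

def Spec_generate_scad_monthly (contributions : List (Int × Int × Int)) (months_per_row : Int) (out : String) : Prop := out = generate_scad_monthly_alt contributions months_per_row
instance (contributions : List (Int × Int × Int)) (months_per_row : Int) (out : String) : Decidable (Spec_generate_scad_monthly contributions months_per_row out) := by unfold Spec_generate_scad_monthly; infer_instance


-- ===== CLAIM (what is proved, stated in full; the proofs are below) =====
def Claim_equal_generate_scad_monthly : Prop := ∀ (contributions : List (Int × Int × Int)) (months_per_row : Int), Dom_generate_scad_monthly contributions months_per_row → Pre_generate_scad_monthly contributions months_per_row → Spec_generate_scad_monthly contributions months_per_row (generate_scad_monthly contributions months_per_row)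

-- ===== LEMMAS AND PROOFS =====

-- the lines emitted for one month slot: one cube per level
def pvEmit (mpr idx y m c : Int) : List String :=
  (PySem.List.pyRange 0 (blocks_for_contributions c) 1).map
    (fun level => cubeLine (PySem.Int.mod idx mpr * 12) (PySem.Int.floordiv idx mpr * 12)
      (level * 10) y m)

theorem pvEmit_nonpos (mpr idx y m c : Int) (hc : c ≤ 0) : pvEmit mpr idx y m c = [] := by
  simp [pvEmit, blocks_for_contributions, hc, PySem.List.pyRange_one_eq_nil]

-- A's month loop, with the level loop already summarised as pvEmit
theorem pv_monthFold (d : PySem.Dict (Int × Int) Int) (mpr y : Int) :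
    ∀ (k : Nat) (mA i : Int) (L : List String),
      (PySem.List.pyRange mA (mA + k) 1).foldl
        (fun (st : Int × List String) month =>
          (st.1 + 1, st.2 ++ pvEmit mpr st.1 y month (d.getD (y, month) 0))) (i, L)
      = (i + k, L ++ (PySem.List.pyRange mA (mA + k) 1).flatMap
          (fun m => pvEmit mpr (i + (m - mA)) y m (d.getD (y, m) 0))) := by
  intro k
  induction k with
  | zero => intro mA i L; simp [PySem.List.pyRange_one_eq_nil]
  | succ k ih =>
    intro mA i L
    have hr : (mA : Int) + ((k + 1 : Nat) : Int) = (mA + 1) + (k : Nat) := by push_cast; ring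
    rw [hr, PySem.List.pyRange_one_cons (by omega : mA < (mA + 1) + (k : Nat))]
    simp only [List.foldl_cons, List.flatMap_cons]
    rw [ih (mA + 1) (i + 1) _]
    have h2 : ∀ m : Int, i + 1 + (m - (mA + 1)) = i + (m - mA) := fun m => by ring
    simp only [h2, sub_self, add_zero, List.append_assoc, Prod.mk.injEq]
    exact ⟨by push_cast; ring, trivial⟩

-- A's year loop, with the month loop already summarised
theorem pv_yearFold (d : PySem.Dict (Int × Int) Int) (mpr : Int) :
    ∀ (k : Nat) (a i : Int) (L : List String),
      (PySem.List.pyRange a (a + k) 1).foldl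
        (fun (st : Int × List String) year =>
          (PySem.List.pyRange 1 13 1).foldl
            (fun (st : Int × List String) month =>
              (st.1 + 1, st.2 ++ pvEmit mpr st.1 year month (d.getD (year, month) 0))) st) (i, L)
      = (i + 12 * k, L ++ (PySem.List.pyRange a (a + k) 1).flatMap
          (fun y => (PySem.List.pyRange 1 13 1).flatMap
            (fun m => pvEmit mpr (i + (y - a) * 12 + (m - 1)) y m (d.getD (y, m) 0)))) := by
  intro k
  induction k with
  | zero => intro a i L; simp [PySem.List.pyRange_one_eq_nil]
  | succ k ih =>
    intro a i L
    have hr : (a : Int) + ((k + 1 : Nat) : Int) = (a + 1) + (k : Nat) := by push_cast; ring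
    rw [hr, PySem.List.pyRange_one_cons (by omega : a < (a + 1) + (k : Nat))]
    simp only [List.foldl_cons, List.flatMap_cons]
    have hm := pv_monthFold d mpr a 12 1 i L
    norm_num at hm
    rw [hm, ih (a + 1) (i + 12) _]
    have h2 : ∀ y m : Int, i + 12 + (y - (a + 1)) * 12 + (m - 1)
        = i + (y - a) * 12 + (m - 1) := fun y m => by ring
    simp only [h2, sub_self, zero_mul, add_zero, List.append_assoc, Prod.mk.injEq]
    exact ⟨by push_cast; ring, trivial⟩

-- B's entry loop, with the level loop already summarised
theorem pv_entryFold (mpr fy : Int) (l : List ((Int × Int) × Int)) (L : List String) :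
    l.foldl (fun lines e =>
      (PySem.List.pyRange 0 (blocks_for_contributions e.2) 1).foldl (fun lines level =>
        lines ++ [cubeLine
          (PySem.Int.mod ((e.1.1 - fy) * 12 + (e.1.2 - 1)) mpr * 12)
          (PySem.Int.floordiv ((e.1.1 - fy) * 12 + (e.1.2 - 1)) mpr * 12)
          (level * 10) e.1.1 e.1.2]) lines) L
    = L ++ l.flatMap (fun e => pvEmit mpr ((e.1.1 - fy) * 12 + (e.1.2 - 1)) e.1.1 e.1.2 e.2) := by
  induction l generalizing L with
  | nil => simp
  | cons e t ih =>
    simp only [List.foldl_cons, List.flatMap_cons]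
    rw [PySem.List.foldl_append_singleton_eq_map, ih]
    simp [pvEmit]

-- dropping months that emit nothing
theorem pv_flatMap_filter {α : Type} (p : α → Bool) (f : α → List String) (l : List α)
    (h : ∀ x ∈ l, p x = false → f x = []) :
    l.flatMap f = (l.filter p).flatMap f := by
  induction l with
  | nil => simp
  | cons x t ih =>
    by_cases hx : p x
    · simp [hx, ih (fun a ha => h a (List.mem_cons_of_mem _ ha))]
    · simp only [Bool.not_eq_true] at hx
      simp [hx, h x (by simp) hx,
        ih (fun a ha => h a (List.mem_cons_of_mem _ ha))]

-- the dense grid of (year, month) cells, in A's enumeration order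
def pvCells (fy ly : Int) : List (Int × Int) :=
  (PySem.List.pyRange fy (ly + 1) 1).flatMap
    (fun y => (PySem.List.pyRange 1 13 1).map (fun m => (y, m)))

theorem pv_mem_cells {fy ly : Int} {c : Int × Int} :
    c ∈ pvCells fy ly ↔ fy ≤ c.1 ∧ c.1 ≤ ly ∧ 1 ≤ c.2 ∧ c.2 ≤ 12 := by
  obtain ⟨y, m⟩ := c
  simp only [pvCells, List.mem_flatMap, List.mem_map, PySem.List.mem_pyRange_one, Prod.mk.injEq]
  constructor
  · rintro ⟨y', ⟨h1, h2⟩, m', ⟨h3, h4⟩, rfl, rfl⟩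
    exact ⟨h1, by omega, h3, by omega⟩
  · rintro ⟨h1, h2, h3, h4⟩
    exact ⟨y, ⟨h1, by omega⟩, m, ⟨h3, by omega⟩, rfl, rfl⟩

-- the grid is strictly increasing in the grid index (year - fy) * 12 + (month - 1)
theorem pv_grid_pairwise (fy : Int) : ∀ (k : Nat) (a : Int),
    ((PySem.List.pyRange a (a + k) 1).flatMap
        (fun y => (PySem.List.pyRange 1 13 1).map (fun m => (y, m)))).Pairwise
      (fun c1 c2 => (c1.1 - fy) * 12 + (c1.2 - 1) < (c2.1 - fy) * 12 + (c2.2 - 1)) := by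
  intro k
  induction k with
  | zero => intro a; simp [PySem.List.pyRange_one_eq_nil]
  | succ k ih =>
    intro a
    have hr : (a : Int) + ((k + 1 : Nat) : Int) = (a + 1) + (k : Nat) := by push_cast; ring
    rw [hr, PySem.List.pyRange_one_cons (by omega : a < (a + 1) + (k : Nat)), List.flatMap_cons]
    apply List.pairwise_append.2
    refine ⟨?_, ih (a + 1), ?_⟩
    · refine List.pairwise_map.2 ?_
      exact (PySem.List.pairwise_lt_pyRange_one (a := (1 : Int)) (b := 13)).imp
        (fun {m1 m2} h => by simp only; omega)
    · intro x hx z hz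
      obtain ⟨m, hm, rfl⟩ := List.mem_map.1 hx
      obtain ⟨y', hy', hz'⟩ := List.mem_flatMap.1 hz
      obtain ⟨m', hm', rfl⟩ := List.mem_map.1 hz'
      have h1 := PySem.List.mem_pyRange_one.1 hm
      have h2 := PySem.List.mem_pyRange_one.1 hy'
      have h3 := PySem.List.mem_pyRange_one.1 hm'
      simp only
      omega

theorem pv_cells_pairwise (fy ly : Int) (h : fy ≤ ly + 1) :
    (pvCells fy ly).Pairwise
      (fun c1 c2 => (c1.1 - fy) * 12 + (c1.2 - 1) < (c2.1 - fy) * 12 + (c2.2 - 1)) := by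
  have hk : (fy : Int) + ((ly + 1 - fy).toNat : Int) = ly + 1 := by omega
  have := pv_grid_pairwise fy (ly + 1 - fy).toNat fy
  rw [hk] at this
  exact this

theorem pv_cells_nodup (fy ly : Int) (h : fy ≤ ly + 1) : (pvCells fy ly).Nodup := by
  exact (pv_cells_pairwise fy ly h).imp
    (fun {c1 c2} hlt => by intro hab; rw [hab] at hlt; omega)

theorem pv_flatMap_map {α β γ : Type} (f : α → β) (g : β → List γ) (l : List α) :
    (l.map f).flatMap g = l.flatMap (fun x => g (f x)) := by
  induction l with
  | nil => rfl
  | cons x t ih => simp [ih]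

theorem pv_flatMap_flatMap {α β γ : Type} (l : List α) (f : α → List β) (g : β → List γ) :
    (l.flatMap f).flatMap g = l.flatMap (fun x => (f x).flatMap g) := by
  induction l with
  | nil => rfl
  | cons x t ih => simp [ih]

theorem pv_cells_flat (d : PySem.Dict (Int × Int) Int) (mpr fy ly : Int) :
    ((pvCells fy ly).flatMap
        (fun c => pvEmit mpr ((c.1 - fy) * 12 + (c.2 - 1)) c.1 c.2 (d.getD c 0)))
      = (PySem.List.pyRange fy (ly + 1) 1).flatMap
          (fun y => (PySem.List.pyRange 1 13 1).flatMap
            (fun m => pvEmit mpr ((y - fy) * 12 + (m - 1)) y m (d.getD (y, m) 0))) := by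
  simp [pvCells, pv_flatMap_flatMap, pv_flatMap_map]

-- ===== VERDICT (by name: the statement is the Claim_ definition above) =====
theorem generate_scad_monthly_spec : Claim_equal_generate_scad_monthly := by
  intro contributions mpr hdom hpre
  unfold Spec_generate_scad_monthly
  simp only [generate_scad_monthly, generate_scad_monthly_alt]
  set d : PySem.Dict (Int × Int) Int :=
    PySem.Dict.ofList (contributions.map (fun t => ((t.1, t.2.1), t.2.2))) with hd
  by_cases hne : d.items = []
  · simp [hne]
  · simp only [hne, if_false]
    set ys := List.map (fun p => p.1.1) d.items with hys
    have hysne : ys ≠ [] := by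
      intro h
      rw [hys] at h
      exact hne (List.map_eq_nil_iff.1 h)
    obtain ⟨fy, hfy⟩ : ∃ v, PySem.List.min? ys (fun y => y) = some v := by
      cases h : PySem.List.min? ys (fun y => y) with
      | none => exact absurd ((PySem.List.min?_eq_none_iff _ _).1 h) hysne
      | some v => exact ⟨v, rfl⟩
    obtain ⟨ly, hly⟩ : ∃ v, PySem.List.max? ys (fun y => y) = some v := by
      cases h : PySem.List.max? ys (fun y => y) with
      | none => exact absurd ((PySem.List.max?_eq_none_iff _ _).1 h) hysne
      | some v => exact ⟨v, rfl⟩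
    rw [hfy, hly]
    simp only [Option.getD_some]
    have hfymem : fy ∈ ys := PySem.List.min?_mem hfy
    have hfyle : fy ≤ ly := PySem.List.max?_isMax hly fy hfymem
    have hstepA : (fun (st : Int × List String) (year : Int) =>
        List.foldl (fun (st : Int × List String) (month : Int) =>
          (st.1 + 1,
            List.foldl (fun lines level =>
              lines ++ [cubeLine (PySem.Int.mod st.1 mpr * 12) (PySem.Int.floordiv st.1 mpr * 12)
                (level * 10) year month]) st.2
              (PySem.List.pyRange 0 (blocks_for_contributions (d.getD (year, month) 0)) 1)))
          st (PySem.List.pyRange 1 13 1))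
      = (fun (st : Int × List String) (year : Int) =>
          List.foldl (fun (st : Int × List String) (month : Int) =>
            (st.1 + 1, st.2 ++ pvEmit mpr st.1 year month (d.getD (year, month) 0))) st
            (PySem.List.pyRange 1 13 1)) := by
      funext st year
      congr 1
      funext st month
      rw [PySem.List.foldl_append_singleton_eq_map]
      rfl
    rw [hstepA]
    rw [show ly + 1 = fy + (((ly + 1 - fy).toNat : Nat) : Int) from by omega]
    rw [pv_yearFold d mpr (ly + 1 - fy).toNat fy 0 ["// Generated by gitshelves"]]
    rw [show fy + (((ly + 1 - fy).toNat : Nat) : Int) = ly + 1 from by omega]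
    rw [pv_entryFold mpr fy]
    simp only [zero_add]
    -- positive cells of the grid, paired with their counts
    set P : Int × Int → Bool := fun c => decide (0 < d.getD c 0) with hP
    set pairF : Int × Int → (Int × Int) × Int := fun c => (c, d.getD c 0) with hpairF
    set target := ((pvCells fy ly).filter P).map pairF with htarget
    set entriesFil := d.items.filter
      (fun p => decide (0 < p.2) && (decide (1 ≤ p.1.2) && decide (p.1.2 ≤ 12))) with hent
    have hndkeys : d.keys.Nodup := by
      rw [hd]
      exact PySem.Dict.nodup_keys_ofList _
    have hnd_items : d.items.Nodup := List.Nodup.of_map _ hndkeys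
    have hnd_entries : entriesFil.Nodup := List.Nodup.filter _ hnd_items
    have hnd_target : target.Nodup := by
      rw [htarget]
      refine List.Nodup.map ?_ (List.Nodup.filter _ (pv_cells_nodup fy ly (by omega)))
      intro a b hab
      exact congrArg Prod.fst hab
    have hmem : ∀ x : (Int × Int) × Int, x ∈ target ↔ x ∈ entriesFil := by
      intro x
      constructor
      · intro hx
        rw [htarget] at hx
        obtain ⟨c, hc, rfl⟩ := List.mem_map.1 hx
        obtain ⟨hcell, hPc⟩ := List.mem_filter.1 hc
        rw [hP] at hPc
        have hpos : 0 < d.getD c 0 := of_decide_eq_true hPc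
        have hbounds := pv_mem_cells.1 hcell
        have hget : d.get? c = some (d.getD c 0) := by
          cases hq : d.get? c with
          | none =>
            rw [PySem.Dict.getD_eq_get?_getD, hq] at hpos
            simp at hpos
          | some v =>
            rw [PySem.Dict.getD_eq_get?_getD, hq]
            rfl
        have hmemit : (c, d.getD c 0) ∈ d.items :=
          (PySem.Dict.get?_eq_some_iff_mem_items d _ _ hndkeys).1 hget
        rw [hent]
        refine List.mem_filter.2 ⟨hmemit, ?_⟩
        simp only [hpairF, Bool.and_eq_true, decide_eq_true_eq]
        exact ⟨hpos, hbounds.2.2.1, hbounds.2.2.2⟩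
      · intro hx
        rw [hent] at hx
        obtain ⟨hmemit, hPred⟩ := List.mem_filter.1 hx
        simp only [Bool.and_eq_true, decide_eq_true_eq] at hPred
        obtain ⟨hpos, hm1, hm2⟩ := hPred
        have hget : d.get? x.1 = some x.2 :=
          (PySem.Dict.get?_eq_some_iff_mem_items d _ _ hndkeys).2 (by simpa using hmemit)
        have hgetD : d.getD x.1 0 = x.2 := by
          rw [PySem.Dict.getD_eq_get?_getD, hget]
          rfl
        have hy : x.1.1 ∈ ys := by
          rw [hys]
          exact List.mem_map.2 ⟨x, hmemit, rfl⟩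
        have hfy' : fy ≤ x.1.1 := PySem.List.min?_isMin hfy x.1.1 hy
        have hly' : x.1.1 ≤ ly := PySem.List.max?_isMax hly x.1.1 hy
        rw [htarget]
        refine List.mem_map.2 ⟨x.1, List.mem_filter.2
          ⟨pv_mem_cells.2 ⟨hfy', hly', hm1, hm2⟩, ?_⟩, ?_⟩
        · rw [hP]
          simp [hgetD, hpos]
        · rw [hpairF]
          simp only [hgetD]
    have hsorted : PySem.List.sorted entriesFil
        (fun e => (e.1.1 - fy) * 12 + (e.1.2 - 1)) false = target := by
      apply PySem.List.sorted_eq_of_perm_of_pairwise_lt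
      · exact (List.perm_ext_iff_of_nodup hnd_target hnd_entries).2 hmem
      · rw [htarget]
        exact List.pairwise_map.2 (List.Pairwise.filter P (pv_cells_pairwise fy ly (by omega)))
    rw [hsorted]
    have hvanish : ∀ c ∈ pvCells fy ly, P c = false →
        pvEmit mpr ((c.1 - fy) * 12 + (c.2 - 1)) c.1 c.2 (d.getD c 0) = [] := by
      intro c _ hc
      refine pvEmit_nonpos _ _ _ _ _ ?_
      rw [hP] at hc
      simpa using hc
    rw [← pv_cells_flat d mpr fy ly,
      pv_flatMap_filter P _ _ hvanish, htarget, pv_flatMap_map]
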